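-- pv_equiv track=rewrite | github.com/BrentRector/orchard | scripts/woz_decode.py | to_nibbles
-- ===== SOURCE A (Python) =====
-- def to_nibbles(track_data, bit_count):
--     bits = []
--     for b in track_data:
--         for i in range(7, -1, -1):
--             bits.append((b >> i) & 1)
--             if len(bits) >= bit_count:
--                 break
--         if len(bits) >= bit_count:
--             break
--     nibbles = []
--     current = 0
--     for b in bits:
--         current = ((current << 1) | b) & 0xFF
--         if current & 0x80:
--             nibbles.append(current)
--             current = 0
--     return nibbles
-- ===== SOURCE B (Python) =====
-- def to_nibbles(track_data, bit_count):
--     # Precompute exactly how many bits of each byte are consumed (8 per full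
--     # byte, then a partial byte), so no break/flag logic is needed.
--     total = min(max(bit_count, 0), 8 * len(track_data))
--     full, rem = divmod(total, 8)
--     counts = [8] * full + ([rem] if rem else [])
--     nibbles = []
--     current = 0
--     for b, n in zip(track_data, counts):
--         for i in range(7, 7 - n, -1):
--             current = ((current << 1) | ((b >> i) & 1)) & 0xFF
--             if current & 0x80:
--                 nibbles.append(current)
--                 current = 0
--     return nibbles
-- ===== Notes on version B (the rewrite author's own statement) =====
-- stated objective: simpler
-- what changed: B precomputes how many bits are consumed (total = min(max(bit_count,0), 8*len), split by divmod into full bytes plus a partial byte) and assembles nibbles in one fused pass over zip(track_data, counts), replacing A's break-and-flag construction of an intermediate bits list followed by a second scan.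
import Mathlib
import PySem

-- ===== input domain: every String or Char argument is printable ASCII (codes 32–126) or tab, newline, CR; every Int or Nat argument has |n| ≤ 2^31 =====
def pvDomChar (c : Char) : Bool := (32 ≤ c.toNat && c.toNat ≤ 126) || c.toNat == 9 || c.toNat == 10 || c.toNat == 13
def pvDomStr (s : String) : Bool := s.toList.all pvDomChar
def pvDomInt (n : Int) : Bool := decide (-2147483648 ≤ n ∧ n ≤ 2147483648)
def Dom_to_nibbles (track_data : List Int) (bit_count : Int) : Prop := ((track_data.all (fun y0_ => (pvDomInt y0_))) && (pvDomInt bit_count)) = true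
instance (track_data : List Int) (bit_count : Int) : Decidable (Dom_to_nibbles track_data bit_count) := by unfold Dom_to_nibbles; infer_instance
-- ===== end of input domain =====

-- B re-implements A by precomputing the consumed bit counts (full bytes + remainder via divmod)
-- instead of A's break-driven bit-list build; objective: simpler (no flags/breaks, one fused pass).

-- (b >> i) & 1 — appears verbatim in both Python sources; i ≥ 0 wherever called (i ∈ range(7, lo, -1))
def pvBit (b i : Int) : Int := PySem.Int.band (b >>> i.toNat) 1

-- the nibble-accumulation statements shared verbatim by both Python sources:
-- current = ((current << 1) | bit) & 0xFF; if current & 0x80: append, reset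
def pvEmit (s : Int × List Int) (bit : Int) : Int × List Int :=
  let c := PySem.Int.band (PySem.Int.bor (s.1 <<< (1 : Nat)) bit) 255
  if PySem.Int.band c 128 ≠ 0 then (0, s.2 ++ [c]) else (c, s.2)

-- ===== PORT A =====
-- inner loop: for i in range(7,-1,-1): bits.append((b>>i)&1); if len(bits)>=bit_count: break
def pvAInner (b bc : Int) : List Int → List Int → List Int
  | [], bits => bits
  | i :: is, bits =>
      let bits' := bits ++ [pvBit b i]
      if bc ≤ (bits'.length : Int) then bits' else pvAInner b bc is bits'

-- outer loop: for b in track_data: <inner>; if len(bits)>=bit_count: break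
def pvAOuter (bc : Int) : List Int → List Int → List Int
  | [], bits => bits
  | b :: rest, bits =>
      let bits' := pvAInner b bc (PySem.List.pyRange 7 (-1) (-1)) bits
      if bc ≤ (bits'.length : Int) then bits' else pvAOuter bc rest bits'

def to_nibbles (track_data : List Int) (bit_count : Int) : List Int :=
  (List.foldl pvEmit (0, []) (pvAOuter bit_count track_data [])).2

-- ===== PORT B =====
def to_nibbles_alt (track_data : List Int) (bit_count : Int) : List Int :=
  let total := min (max bit_count 0) (8 * (track_data.length : Int))
  let full := PySem.Int.floordiv total 8
  let rem := PySem.Int.mod total 8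
  -- counts = [8]*full + ([rem] if rem else []); full ≥ 0, so .toNat is exact
  let counts : List Int := List.replicate full.toNat 8 ++ (if rem ≠ 0 then [rem] else [])
  (List.foldl
      (fun s p =>
        List.foldl (fun s i => pvEmit s (pvBit p.1 i)) s (PySem.List.pyRange 7 (7 - p.2) (-1)))
      (0, []) (track_data.zip counts)).2

-- ===== PRECONDITION & SPEC =====
def Spec_to_nibbles (track_data : List Int) (bit_count : Int) (out : List Int) : Prop := out = to_nibbles_alt track_data bit_count
instance (track_data : List Int) (bit_count : Int) (out : List Int) : Decidable (Spec_to_nibbles track_data bit_count out) := by unfold Spec_to_nibbles; infer_instance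

-- ===== CLAIM (what is proved, stated in full; the proofs are below) =====
def Claim_equal_to_nibbles : Prop := ∀ (track_data : List Int) (bit_count : Int), Dom_to_nibbles track_data bit_count → Spec_to_nibbles track_data bit_count (to_nibbles track_data bit_count)

-- ===== LEMMAS AND PROOFS =====

def pvBitsOf (b : Int) : List Int := (PySem.List.pyRange 7 (-1) (-1)).map (pvBit b)
def pvF (track : List Int) : List Int := track.flatMap pvBitsOf

theorem pvRange8 : PySem.List.pyRange 7 (-1) (-1) = [7, 6, 5, 4, 3, 2, 1, 0] := by decide

theorem pvBitsOf_length (b : Int) : (pvBitsOf b).length = 8 := by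
  simp [pvBitsOf, pvRange8]

theorem pvF_length (track : List Int) : (pvF track).length = 8 * track.length := by
  induction track with
  | nil => simp [pvF]
  | cons t rest ih => simp [pvF, pvBitsOf_length] at *; omega

theorem pvAInner_eq (b bc : Int) (is : List Int) : ∀ bits : List Int,
    pvAInner b bc is bits
      = bits ++ (is.map (pvBit b)).take (max (bc - bits.length) 1).toNat := by
  induction is with
  | nil => intro bits; simp [pvAInner]
  | cons i is ih =>
      intro bits
      simp only [pvAInner, List.map_cons]
      by_cases h : bc ≤ ((bits ++ [pvBit b i]).length : Int)
      · simp only [if_pos h]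
        have : (max (bc - bits.length) 1).toNat = 1 := by
          simp [List.length_append] at h; omega
        simp [this]
      · simp only [if_neg h, ih]
        have hm : (max (bc - bits.length) 1).toNat
            = (max (bc - ((bits ++ [pvBit b i]).length : Int)) 1).toNat + 1 := by
          simp [List.length_append] at h ⊢; omega
        simp [hm, List.take_succ_cons]

theorem pvAOuter_eq (bc : Int) : ∀ (track bits : List Int),
    pvAOuter bc track bits
      = bits ++ (pvF track).take (max (bc - bits.length) 1).toNat := by
  intro track
  induction track with
  | nil => intro bits; simp [pvAOuter, pvF]
  | cons t rest ih =>
      intro bits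
      have h8 : ((PySem.List.pyRange 7 (-1) (-1)).map (pvBit t)) = pvBitsOf t := rfl
      simp only [pvAOuter, pvAInner_eq, h8]
      set m := (max (bc - bits.length) 1).toNat with hm
      by_cases hle : m ≤ 8
      · have hcond : bc ≤ (((bits ++ (pvBitsOf t).take m).length : Nat) : Int) := by
          have := pvBitsOf_length t
          simp [List.length_append, List.length_take, this]
          omega
        rw [if_pos hcond]
        have : (pvF (t :: rest)).take m = (pvBitsOf t).take m := by
          have h : pvF (t :: rest) = pvBitsOf t ++ pvF rest := by simp [pvF]
          rw [h, List.take_append_of_le_length (by rw [pvBitsOf_length]; exact hle)]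
        rw [this]
      · have htake : (pvBitsOf t).take m = pvBitsOf t :=
          List.take_of_length_le (by rw [pvBitsOf_length]; omega)
        have hcond : ¬ bc ≤ (((bits ++ (pvBitsOf t).take m).length : Nat) : Int) := by
          have := pvBitsOf_length t
          simp [htake, List.length_append, this]
          omega
        rw [if_neg hcond, ih]
        have hsplit : pvF (t :: rest) = pvBitsOf t ++ pvF rest := by simp [pvF]
        have hlen : (bits ++ (pvBitsOf t).take m).length = bits.length + 8 := by
          simp [htake, pvBitsOf_length]
        have hm' : (max (bc - ((bits.length + 8 : Nat) : Int)) 1).toNat = m - 8 := by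
          simp at hm ⊢; omega
        rw [hlen, hm', htake, hsplit]
        have : (pvBitsOf t ++ pvF rest).take m = pvBitsOf t ++ (pvF rest).take (m - 8) := by
          have h := List.take_append (l₁ := pvBitsOf t) (l₂ := pvF rest) (i := m)
          rw [h, List.take_of_length_le (by rw [pvBitsOf_length]; omega), pvBitsOf_length]
        rw [this, List.append_assoc]

theorem pvA_char (track : List Int) (bc : Int) :
    to_nibbles track bc
      = (List.foldl pvEmit (0, []) ((pvF track).take (max bc 1).toNat)).2 := by
  simp [to_nibbles, pvAOuter_eq]

theorem pvRange_partial (r : Int) (h0 : 0 ≤ r) (h8 : r < 8) :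
    PySem.List.pyRange 7 (7 - r) (-1)
      = (PySem.List.pyRange 7 (-1) (-1)).take r.toNat := by
  interval_cases r <;> decide

theorem pvB_zip (q : Nat) : ∀ (track : List Int) (r : Int) (s : Int × List Int),
    0 ≤ r → r < 8 → q ≤ track.length → (r ≠ 0 → q < track.length) →
    List.foldl
        (fun s p =>
          List.foldl (fun s i => pvEmit s (pvBit p.1 i)) s (PySem.List.pyRange 7 (7 - p.2) (-1)))
        s (track.zip (List.replicate q 8 ++ (if r ≠ 0 then [r] else [])))
      = List.foldl pvEmit s ((pvF track).take (8 * q + r.toNat)) := by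
  induction q with
  | zero =>
      intro track r s h0 h8 _ hlt
      by_cases hr : r = 0
      · subst hr; simp
      · simp only [if_pos hr, List.replicate_zero, List.nil_append]
        obtain ⟨t, rest, rfl⟩ : ∃ t rest, track = t :: rest := by
          cases track with
          | nil => exact absurd (hlt hr) (by simp)
          | cons t rest => exact ⟨t, rest, rfl⟩
        simp only [List.zip_cons_cons, List.zip_nil_right, List.foldl_cons, List.foldl_nil]
        rw [pvRange_partial r h0 h8]
        have hsplit : pvF (t :: rest) = pvBitsOf t ++ pvF rest := by simp [pvF]
        rw [hsplit, Nat.mul_zero, Nat.zero_add,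
          List.take_append_of_le_length (by rw [pvBitsOf_length]; omega)]
        rw [show (pvBitsOf t).take r.toNat
              = ((PySem.List.pyRange 7 (-1) (-1)).take r.toNat).map (pvBit t) by
            simp [pvBitsOf, List.map_take]]
        rw [List.foldl_map]
  | succ q ih =>
      intro track r s h0 h8 hq hlt
      obtain ⟨t, rest, rfl⟩ : ∃ t rest, track = t :: rest := by
        cases track with
        | nil => simp at hq
        | cons t rest => exact ⟨t, rest, rfl⟩
      simp only [List.replicate_succ, List.cons_append, List.zip_cons_cons, List.foldl_cons]
      have hstep :
          List.foldl (fun s i => pvEmit s (pvBit t i)) s (PySem.List.pyRange 7 (7 - (8:Int)) (-1))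
            = List.foldl pvEmit s (pvBitsOf t) := by
        rw [show (7 - (8:Int)) = -1 by norm_num]
        simp only [pvBitsOf]
        rw [List.foldl_map]
      rw [hstep, ih rest r _ h0 h8 (by simpa using hq) (fun h => by have := hlt h; simpa using this)]
      have hsplit : pvF (t :: rest) = pvBitsOf t ++ pvF rest := by simp [pvF]
      have htake : (pvF (t :: rest)).take (8 * (q + 1) + r.toNat)
          = pvBitsOf t ++ (pvF rest).take (8 * q + r.toNat) := by
        rw [hsplit,
          show 8 * (q + 1) + r.toNat = (pvBitsOf t).length + (8 * q + r.toNat) from by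
            rw [pvBitsOf_length]; omega,
          List.take_append]
        simp
      rw [htake, List.foldl_append]

theorem pvB_char (track : List Int) (bc : Int) :
    to_nibbles_alt track bc
      = (List.foldl pvEmit (0, [])
          ((pvF track).take (min (max bc 0) (8 * (track.length : Int))).toNat)).2 := by
  simp only [to_nibbles_alt]
  set total := min (max bc 0) (8 * (track.length : Int)) with htot
  have h0 : 0 ≤ total := le_min (le_max_right _ _) (by positivity)
  have hub : total ≤ 8 * (track.length : Int) := min_le_right _ _
  have hfm := PySem.Int.floordiv_mul_add_mod total 8
  have hm0 : 0 ≤ PySem.Int.mod total 8 := PySem.Int.mod_nonneg _ (by norm_num)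
  have hm8 : PySem.Int.mod total 8 < 8 := PySem.Int.mod_lt _ (by norm_num)
  rw [pvB_zip (PySem.Int.floordiv total 8).toNat track (PySem.Int.mod total 8) (0, []) hm0 hm8
      (by omega) (by intro h; omega)]
  have : 8 * (PySem.Int.floordiv total 8).toNat + (PySem.Int.mod total 8).toNat = total.toNat := by
    omega
  rw [this]

theorem pvBit_cases (b i : Int) : pvBit b i = 0 ∨ pvBit b i = 1 := by
  have h := PySem.Int.band_one (b >>> i.toNat)
  have h1 := PySem.Int.mod_nonneg (b >>> i.toNat) (b := 2) (by norm_num)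
  have h2 := PySem.Int.mod_lt (b >>> i.toNat) (b := 2) (by norm_num)
  unfold pvBit
  omega

theorem pvEmit_single_bit (b i : Int) :
    (List.foldl pvEmit (0, ([] : List Int)) [pvBit b i]).2 = [] := by
  rcases pvBit_cases b i with h | h <;> simp [h, pvEmit] <;> decide

-- ===== VERDICT (by name: the statement is the Claim_ definition above) =====
theorem to_nibbles_spec : Claim_equal_to_nibbles := by
  intro track bc _
  unfold Spec_to_nibbles
  rw [pvA_char, pvB_char]
  by_cases hbc : 1 ≤ bc
  · congr 2
    have h1 : max bc 1 = bc := by omega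
    have hmax : max bc 0 = bc := by omega
    rw [h1, hmax]
    rcases le_or_gt bc (8 * (track.length : Int)) with h | h
    · rw [min_eq_left h]
    · rw [min_eq_right (le_of_lt h)]
      rw [List.take_of_length_le (by rw [pvF_length]; omega),
          List.take_of_length_le (by rw [pvF_length]; omega)]
  · have hmax1 : (max bc 1).toNat = 1 := by omega
    have hmin : (min (max bc 0) (8 * (track.length : Int))).toNat = 0 := by
      have : (0:Int) ≤ 8 * (track.length : Int) := by positivity
      omega
    rw [hmax1, hmin, List.take_zero]
    cases track with
    | nil => simp [pvF]
    | cons t rest =>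
        have hhead : (pvF (t :: rest)).take 1 = [pvBit t 7] := by
          simp [pvF, pvBitsOf, pvRange8]
        rw [hhead]
        simpa using pvEmit_single_bit t 7
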